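-- pv_equiv track=rewrite | github.com/SrujanPR/Youtube-Transcripter | app.py | _pick_track
-- ===== SOURCE A (Python) =====
-- def _pick_track(tracks, lang="en"):
--     for t in tracks:
--         if t.get("languageCode") == lang and t.get("kind", "") != "asr":
--             return t
--     for t in tracks:
--         if t.get("languageCode") == lang:
--             return t
--     for t in tracks:
--         if (t.get("languageCode") or "").startswith(lang):
--             return t
--     return tracks[0] if tracks else None
-- ===== SOURCE B (Python) =====
-- def _pick_track(tracks, lang="en"):
--     def score(t):
--         lc = t.get("languageCode")
--         if lc == lang:
--             return 0 if t.get("kind", "") != "asr" else 1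
--         if (lc or "").startswith(lang):
--             return 2
--         return 3
--     best, best_score = None, 4
--     for t in tracks:
--         s = score(t)
--         if s < best_score:
--             best, best_score = t, s
--     return best
-- ===== Notes on version B (the rewrite author's own statement) =====
-- stated objective: simpler
-- what changed: Replaces A's three sequential scans plus a head fallback by one priority-scoring function and a single pass that keeps the first track with the lowest score.
import Mathlib
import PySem

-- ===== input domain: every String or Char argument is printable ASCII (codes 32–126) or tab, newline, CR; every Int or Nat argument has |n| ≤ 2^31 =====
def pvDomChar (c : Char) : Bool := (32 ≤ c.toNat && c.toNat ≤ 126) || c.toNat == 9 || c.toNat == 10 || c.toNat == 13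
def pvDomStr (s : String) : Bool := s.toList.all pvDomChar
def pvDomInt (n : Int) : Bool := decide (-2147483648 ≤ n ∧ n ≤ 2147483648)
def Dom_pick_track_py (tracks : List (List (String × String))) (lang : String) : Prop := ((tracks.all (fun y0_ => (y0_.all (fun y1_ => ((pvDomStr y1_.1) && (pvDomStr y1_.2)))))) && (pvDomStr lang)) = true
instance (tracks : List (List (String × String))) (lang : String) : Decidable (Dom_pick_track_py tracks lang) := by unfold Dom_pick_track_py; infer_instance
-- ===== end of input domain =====

-- B replaces A's three sequential scans + head fallback by a priority score and a
-- single pass keeping the first lowest-scored track (objective: simpler).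

-- shared dict primitives: t.get(k) / t.get(k, d) on the association list
def pvGet (t : List (String × String)) (k : String) : Option String :=
  (PySem.Dict.mk t).get? k
def pvGetD (t : List (String × String)) (k : String) (d : String) : String :=
  (PySem.Dict.mk t).getD k d

-- ===== PORT A =====
-- Each 'for t in tracks: if cond: return t' loop is List.find? on that condition,
-- tried in A's order; final fallback is 'tracks[0] if tracks else None' = head?.
def pick_track_py (tracks : List (List (String × String))) (lang : String) : Option (List (String × String)) :=
  match tracks.find? (fun t => (pvGet t "languageCode" == some lang) && (pvGetD t "kind" "" != "asr")) with
  | some t => some t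
  | none =>
    match tracks.find? (fun t => pvGet t "languageCode" == some lang) with
    | some t => some t
    | none =>
      match tracks.find? (fun t => PySem.Str.startswith (pvGetD t "languageCode" "") lang) with
      | some t => some t
      | none => tracks.head?

-- ===== PORT B =====
-- Source B's score(t): tier 0/1 on exact language match (non-asr first), 2 on prefix match, 3 otherwise.
def pvScore (lang : String) (t : List (String × String)) : Nat :=
  if pvGet t "languageCode" = some lang then
    (if pvGetD t "kind" "" ≠ "asr" then 0 else 1)
  else if PySem.Str.startswith ((pvGet t "languageCode").getD "") lang then 2
  else 3

def pick_track_py_alt (tracks : List (List (String × String))) (lang : String) : Option (List (String × String)) :=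
  (tracks.foldl
    (fun (acc : Option (List (String × String)) × Nat) t =>
      let s := pvScore lang t
      if s < acc.2 then (some t, s) else acc)
    (none, 4)).1

-- ===== PRECONDITION & SPEC =====
def Spec_pick_track_py (tracks : List (List (String × String))) (lang : String) (out : Option (List (String × String))) : Prop := out = pick_track_py_alt tracks lang
instance (tracks : List (List (String × String))) (lang : String) (out : Option (List (String × String))) : Decidable (Spec_pick_track_py tracks lang out) := by unfold Spec_pick_track_py; infer_instance

-- ===== CLAIM (what is proved, stated in full; the proofs are below) =====
def Claim_equal_pick_track_py : Prop := ∀ (tracks : List (List (String × String))) (lang : String), Dom_pick_track_py tracks lang → Spec_pick_track_py tracks lang (pick_track_py tracks lang)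

-- ===== LEMMAS AND PROOFS =====

-- first track of tier < s, in A's cascade order, as a function of the bound s
def pvChain (lang : String) (l : List (List (String × String))) : Nat → Option (List (String × String))
  | 0 => none
  | k+1 => (pvChain lang l k).or (l.find? (fun t => pvScore lang t == k))

theorem pvFind_congr {α : Type} (p q : α → Bool) (l : List α)
    (h : ∀ x ∈ l, p x = q x) : l.find? p = l.find? q := by
  induction l with
  | nil => rfl
  | cons a l ih =>
    have ha := h a (by simp)
    simp only [List.find?_cons, ha]
    cases q a
    · exact ih (fun x hx => h x (by simp [hx]))
    · rfl

theorem pvStartswith_self (s : List Char) : PySem.Chars.startswith s s = true := by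
  simp [PySem.Chars.startswith_iff]

theorem pvScore_le3 (lang : String) (t : List (String × String)) : pvScore lang t ≤ 3 := by
  unfold pvScore; split_ifs <;> omega

theorem pvPredA1 (lang : String) (t : List (String × String)) :
    ((pvGet t "languageCode" == some lang) && (pvGetD t "kind" "" != "asr"))
      = (pvScore lang t == 0) := by
  unfold pvScore
  cases h : pvGet t "languageCode" <;> simp [h] <;> split_ifs <;> simp_all

theorem pvPredA2 (lang : String) (t : List (String × String)) :
    (pvGet t "languageCode" == some lang) = decide (pvScore lang t ≤ 1) := by
  unfold pvScore
  cases h : pvGet t "languageCode" <;> simp [h] <;> split_ifs <;> simp_all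

theorem pvPredA3 (lang : String) (t : List (String × String)) :
    (PySem.Str.startswith (pvGetD t "languageCode" "") lang) = decide (pvScore lang t ≤ 2) := by
  unfold pvScore
  have hd : pvGetD t "languageCode" "" = (pvGet t "languageCode").getD "" := by
    unfold pvGet pvGetD
    exact PySem.Dict.getD_eq_get?_getD _ _ _
  rw [hd]
  cases h : pvGet t "languageCode" <;> simp [h] <;> split_ifs <;>
    simp_all [pvStartswith_self]

theorem pvPred2' (lang : String) (t : List (String × String)) (h : pvScore lang t ≠ 0) :
    (pvGet t "languageCode" == some lang) = (pvScore lang t == 1) := by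
  rw [pvPredA2]
  rcases hs : pvScore lang t with _ | _ | n
  · exact absurd hs h
  · simp
  · simp

theorem pvPred3' (lang : String) (t : List (String × String))
    (h0 : pvScore lang t ≠ 0) (h1 : pvScore lang t ≠ 1) :
    (PySem.Str.startswith (pvGetD t "languageCode" "") lang) = (pvScore lang t == 2) := by
  rw [pvPredA3]
  rcases hs : pvScore lang t with _ | _ | _ | n
  · exact absurd hs h0
  · exact absurd hs h1
  · simp
  · simp

theorem pvOr_absorb {α : Type} (a : Option α) (t : α) (y : Option α) :
    ((a.or (some t)).or y) = a.or (some t) := by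
  cases a <;> rfl

theorem pvChain_nil (lang : String) (s : Nat) : pvChain lang [] s = none := by
  induction s with
  | zero => rfl
  | succ k ih => simp [pvChain, ih, Option.or]

theorem pvChain_cons_ge (lang : String) (t : List (String × String))
    (l : List (List (String × String))) (s : Nat) (h : s ≤ pvScore lang t) :
    pvChain lang (t :: l) s = pvChain lang l s := by
  induction s with
  | zero => rfl
  | succ k ih =>
    have hk : (pvScore lang t == k) = false := by simp; omega
    simp only [pvChain, ih (by omega), List.find?_cons, hk]

theorem pvChain_cons_lt (lang : String) (t : List (String × String))
    (l : List (List (String × String))) (s : Nat) (h : pvScore lang t < s) :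
    pvChain lang (t :: l) s = (pvChain lang l (pvScore lang t)).or (some t) := by
  induction s with
  | zero => omega
  | succ k ih =>
    by_cases hk : pvScore lang t = k
    · subst hk
      have hb : (pvScore lang t == pvScore lang t) = true := by simp
      simp only [pvChain, pvChain_cons_ge lang t l _ (le_refl _), List.find?_cons, hb]
    · have hlt : pvScore lang t < k := by omega
      have hne : (pvScore lang t == k) = false := by simp [hk]
      simp only [pvChain, ih hlt, List.find?_cons, hne]
      exact pvOr_absorb _ _ _

theorem pvFold_chain (lang : String) (l : List (List (String × String)))
    (b : Option (List (String × String))) (s : Nat) :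
    (l.foldl
      (fun (acc : Option (List (String × String)) × Nat) t =>
        let u := pvScore lang t
        if u < acc.2 then (some t, u) else acc)
      (b, s)).1 = (pvChain lang l s).or b := by
  induction l generalizing b s with
  | nil => simp [pvChain_nil, Option.or]
  | cons t l ih =>
    by_cases h : pvScore lang t < s
    · simp only [List.foldl_cons, if_pos h, ih, pvChain_cons_lt lang t l s h]
      cases pvChain lang l (pvScore lang t) <;> rfl
    · simp only [List.foldl_cons, if_neg h, ih,
        pvChain_cons_ge lang t l s (by omega)]

theorem pvFindAll3 (lang : String) (l : List (List (String × String)))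
    (h : ∀ t ∈ l, pvScore lang t = 3) :
    l.find? (fun t => pvScore lang t == 3) = l.head? := by
  cases l with
  | nil => rfl
  | cons t l =>
    have := h t (by simp)
    simp [this]

theorem pick_track_eq (tracks : List (List (String × String))) (lang : String) :
    pick_track_py tracks lang = pick_track_py_alt tracks lang := by
  unfold pick_track_py pick_track_py_alt
  rw [pvFold_chain]
  show _ = (pvChain lang tracks 4).or none
  simp only [pvChain, Option.none_or, Option.or_none]
  rw [pvFind_congr _ _ tracks (fun t _ => pvPredA1 lang t)]
  cases h0 : tracks.find? (fun t => pvScore lang t == 0) with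
  | some t => simp [Option.or]
  | none =>
    have h0' : ∀ t ∈ tracks, pvScore lang t ≠ 0 := by
      intro t ht
      have := List.find?_eq_none.mp h0 t ht
      simpa using this
    rw [pvFind_congr _ (fun t => pvScore lang t == 1) tracks
        (fun t ht => pvPred2' lang t (h0' t ht))]
    cases h1 : tracks.find? (fun t => pvScore lang t == 1) with
    | some t => simp [Option.or]
    | none =>
      have h1' : ∀ t ∈ tracks, pvScore lang t ≠ 1 := by
        intro t ht
        have := List.find?_eq_none.mp h1 t ht
        simpa using this
      rw [pvFind_congr _ (fun t => pvScore lang t == 2) tracks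
          (fun t ht => pvPred3' lang t (h0' t ht) (h1' t ht))]
      cases h2 : tracks.find? (fun t => pvScore lang t == 2) with
      | some t => simp [Option.or]
      | none =>
        have h2' : ∀ t ∈ tracks, pvScore lang t = 3 := by
          intro t ht
          have hn := List.find?_eq_none.mp h2 t ht
          have h3 := pvScore_le3 lang t
          have := h0' t ht; have := h1' t ht
          simp at hn; omega
        rw [← pvFindAll3 lang tracks h2']
        simp [Option.or]

-- ===== VERDICT (by name: the statement is the Claim_ definition above) =====
theorem pick_track_py_spec : Claim_equal_pick_track_py := by
  intro tracks lang _
  exact pick_track_eq tracks lang
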